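-- pv_equiv track=rewrite | github.com/wowoduang/AIVideoGPT | app/services/plot_chunker.py | _speaker_exchange_pairs
-- ===== SOURCE A (Python) =====
-- from typing import Dict, List, Sequence, Tuple
--
-- def _speaker_exchange_pairs(speaker_sequence: Sequence[str]) -> List[str]:
--     compact = [
--         speaker
--         for speaker in (str(item or "").strip() for item in (speaker_sequence or []))
--         if speaker
--     ]
--     if not compact:
--         return []
--
--     turns: List[str] = []
--     for speaker in compact:
--         if not turns or speaker != turns[-1]:
--             turns.append(speaker)
--
--     pairs: List[str] = []
--     for left, right in zip(turns, turns[1:]):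
--         if left and right and left != right:
--             pairs.append(f"{left}->{right}")
--     return pairs
-- ===== SOURCE B (Python) =====
-- def _speaker_exchange_pairs(speaker_sequence):
--     pairs = []
--     prev = None
--     for item in (speaker_sequence or []):
--         speaker = str(item or "").strip()
--         if not speaker:
--             continue
--         if speaker != prev:
--             if prev is not None:
--                 pairs.append(f"{prev}->{speaker}")
--             prev = speaker
--     return pairs
-- ===== Notes on version B (the rewrite author's own statement) =====
-- stated objective: simpler
-- what changed: Replaces A's three passes (build cleaned list, collapse into a turns list, zip-pair adjacent turns) with one pass over the raw input keeping a single scalar prev, emitting a pair whenever the cleaned speaker differs from prev.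
import Mathlib
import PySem

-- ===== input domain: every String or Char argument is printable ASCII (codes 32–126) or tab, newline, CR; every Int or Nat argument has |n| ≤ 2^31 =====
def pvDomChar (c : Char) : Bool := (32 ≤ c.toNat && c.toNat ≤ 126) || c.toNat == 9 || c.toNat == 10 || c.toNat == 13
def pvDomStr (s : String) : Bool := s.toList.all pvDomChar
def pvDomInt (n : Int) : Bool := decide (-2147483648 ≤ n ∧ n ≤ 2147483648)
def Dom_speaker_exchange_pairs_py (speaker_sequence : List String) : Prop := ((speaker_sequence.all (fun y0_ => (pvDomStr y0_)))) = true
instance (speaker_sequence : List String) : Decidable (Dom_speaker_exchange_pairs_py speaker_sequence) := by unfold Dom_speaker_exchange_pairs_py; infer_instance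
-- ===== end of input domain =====

-- B replaces A's three passes (clean, collapse to turns, zip-pair) by one pass with a single
-- scalar `prev`; same return value, chosen for simplicity (no speed claim).

-- ===== PORT A =====
-- `str(item or "").strip()` on a string item is just `item.strip()` (str("") = "").
def speaker_exchange_pairs_py (speaker_sequence : List String) : List String :=
  let compact := (speaker_sequence.map (fun item => PySem.Str.strip item)).filter (fun s => s ≠ "")
  if compact = [] then []
  else
    -- turns[-1] on a non-empty list is its last element
    let turns := compact.foldl
      (fun turns speaker => if turns = [] ∨ speaker ≠ turns.getLastD "" then turns ++ [speaker] else turns) []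
    -- turns[1:] = turns.drop 1
    (turns.zip (turns.drop 1)).foldl
      (fun pairs lr => if lr.1 ≠ "" ∧ lr.2 ≠ "" ∧ lr.1 ≠ lr.2 then pairs ++ [lr.1 ++ "->" ++ lr.2] else pairs) []

-- ===== PORT B =====
-- state = (prev : Option String, pairs); `speaker != prev` with prev = None is always true.
def speaker_exchange_pairs_py_alt (speaker_sequence : List String) : List String :=
  (speaker_sequence.foldl
    (fun st item =>
      let speaker := PySem.Str.strip item
      if speaker = "" then st
      else
        match st.1 with
        | none => (some speaker, st.2)
        | some p => if speaker = p then st else (some speaker, st.2 ++ [p ++ "->" ++ speaker]))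
    (none, [])).2

-- ===== PRECONDITION & SPEC =====
def Spec_speaker_exchange_pairs_py (speaker_sequence : List String) (out : List String) : Prop := out = speaker_exchange_pairs_py_alt speaker_sequence
instance (speaker_sequence : List String) (out : List String) : Decidable (Spec_speaker_exchange_pairs_py speaker_sequence out) := by unfold Spec_speaker_exchange_pairs_py; infer_instance

-- ===== CLAIM (what is proved, stated in full; the proofs are below) =====
def Claim_equal_speaker_exchange_pairs_py : Prop := ∀ (speaker_sequence : List String), Dom_speaker_exchange_pairs_py speaker_sequence → Spec_speaker_exchange_pairs_py speaker_sequence (speaker_exchange_pairs_py speaker_sequence)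

-- ===== LEMMAS AND PROOFS =====

-- recursive collapse of consecutive duplicates (relative to a previous speaker p)
def pvCol (p : String) : List String → List String
  | [] => []
  | s :: r => if s = p then pvCol p r else s :: pvCol s r

-- canonical pair list starting from previous speaker p
def pvPairs (p : String) : List String → List String
  | [] => []
  | s :: r => if s = p then pvPairs p r else (p ++ "->" ++ s) :: pvPairs s r

-- step functions of the two ports
theorem pvCol_cons (p s : String) (r : List String) :
    pvCol p (s :: r) = if s = p then pvCol p r else s :: pvCol s r := rfl

theorem pvPairs_cons (p s : String) (r : List String) :
    pvPairs p (s :: r) = if s = p then pvPairs p r else (p ++ "->" ++ s) :: pvPairs s r := rfl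

def pvTurnStep (turns : List String) (speaker : String) : List String :=
  if turns = [] ∨ speaker ≠ turns.getLastD "" then turns ++ [speaker] else turns

def pvBStep (st : Option String × List String) (item : String) : Option String × List String :=
  let speaker := PySem.Str.strip item
  if speaker = "" then st
  else
    match st.1 with
    | none => (some speaker, st.2)
    | some p => if speaker = p then st else (some speaker, st.2 ++ [p ++ "->" ++ speaker])

theorem pvTurns_eq (c : List String) : ∀ t : List String, t ≠ [] →
    c.foldl pvTurnStep t = t ++ pvCol (t.getLastD "") c := by
  induction c with
  | nil => intro t ht; simp [pvCol]
  | cons s r ih =>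
    intro t ht
    rw [List.foldl_cons]
    by_cases hs : s = t.getLastD ""
    · have hstep : pvTurnStep t s = t := by
        unfold pvTurnStep
        exact if_neg (fun hor => hor.elim ht (fun hn => hn hs))
      rw [hstep, ih t ht]
      congr 1
      rw [pvCol_cons, if_pos hs]
    · have hstep : pvTurnStep t s = t ++ [s] := by
        unfold pvTurnStep; rw [if_pos (Or.inr hs)]
      have hne : (t ++ [s]) ≠ [] := by simp
      have hlast : (t ++ [s]).getLastD "" = s := by
        simp [List.getLastD_eq_getLast?]
      rw [hstep, ih (t ++ [s]) hne, hlast,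
        pvCol_cons, if_neg hs, List.append_assoc]
      rfl

theorem pvPairs_of_col (c : List String) : ∀ p : String, p ≠ "" → (∀ s ∈ c, s ≠ "") →
    ((((p :: pvCol p c).zip ((p :: pvCol p c).drop 1)).filter
        (fun lr => lr.1 ≠ "" ∧ lr.2 ≠ "" ∧ lr.1 ≠ lr.2)).map (fun lr => lr.1 ++ "->" ++ lr.2))
      = pvPairs p c := by
  induction c with
  | nil => intro p _ _; simp [pvCol, pvPairs]
  | cons s r ih =>
    intro p hp hmem
    have hs : s ≠ "" := hmem s (by simp)
    have hmem' : ∀ x ∈ r, x ≠ "" := fun x hx => hmem x (by simp [hx])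
    by_cases h : s = p
    · rw [pvCol_cons, if_pos h, pvPairs_cons, if_pos h]
      exact ih p hp hmem'
    · rw [pvCol_cons, if_neg h, pvPairs_cons, if_neg h]
      have := ih s hs hmem'
      simp only [List.drop_one, List.tail_cons, List.zip_cons_cons] at this ⊢
      rw [List.filter_cons_of_pos (by simp only [ne_eq, decide_eq_true_eq]; exact ⟨hp, hs, Ne.symm h⟩),
        List.map_cons, this]

theorem pvB_some (seq : List String) : ∀ (p : String) (acc : List String),
    (seq.foldl pvBStep (some p, acc)).2
      = acc ++ pvPairs p ((seq.map (fun i => PySem.Str.strip i)).filter (fun s => s ≠ "")) := by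
  induction seq with
  | nil => intro p acc; simp [pvPairs]
  | cons s r ih =>
    intro p acc
    rw [List.foldl_cons, List.map_cons]
    by_cases h0 : PySem.Str.strip s = ""
    · rw [show pvBStep (some p, acc) s = (some p, acc) from by simp [pvBStep, h0],
        List.filter_cons_of_neg (by simp [h0])]
      exact ih p acc
    · by_cases h1 : PySem.Str.strip s = p
      · rw [show pvBStep (some p, acc) s = (some p, acc) from by simp [pvBStep, h1],
          List.filter_cons_of_pos (by simp [h0]), pvPairs_cons, if_pos h1]
        exact ih p acc
      · rw [show pvBStep (some p, acc) s
              = (some (PySem.Str.strip s), acc ++ [p ++ "->" ++ PySem.Str.strip s]) from by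
            simp [pvBStep, h0, h1],
          List.filter_cons_of_pos (by simp [h0]), pvPairs_cons, if_neg h1, ih]
        simp

theorem pvB_none (seq : List String) :
    (seq.foldl pvBStep (none, [])).2
      = match (seq.map (fun i => PySem.Str.strip i)).filter (fun s => s ≠ "") with
        | [] => []
        | s :: r => pvPairs s r := by
  induction seq with
  | nil => simp
  | cons s r ih =>
    rw [List.foldl_cons, List.map_cons]
    by_cases h0 : PySem.Str.strip s = ""
    · rw [show pvBStep (none, []) s = (none, []) from by simp [pvBStep, h0],
        List.filter_cons_of_neg (by simp [h0])]
      exact ih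
    · rw [show pvBStep (none, []) s = (some (PySem.Str.strip s), []) from by simp [pvBStep, h0],
        List.filter_cons_of_pos (by simp [h0]), pvB_some]
      simp

-- ===== VERDICT (by name: the statement is the Claim_ definition above) =====
theorem speaker_exchange_pairs_py_spec : Claim_equal_speaker_exchange_pairs_py := by
  intro seq _
  unfold Spec_speaker_exchange_pairs_py
  rw [show speaker_exchange_pairs_py_alt seq = (seq.foldl pvBStep (none, [])).2 from rfl,
    pvB_none]
  cases hcc : (seq.map (fun i => PySem.Str.strip i)).filter (fun s => s ≠ "") with
  | nil =>
    unfold speaker_exchange_pairs_py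
    rw [hcc]
    simp
  | cons s r =>
    have hs : s ≠ "" := by
      have hm : s ∈ (seq.map (fun i => PySem.Str.strip i)).filter (fun s => s ≠ "") := by
        rw [hcc]; simp
      simpa using List.of_mem_filter hm
    have hmem : ∀ x ∈ r, x ≠ "" := by
      intro x hx
      have hm : x ∈ (seq.map (fun i => PySem.Str.strip i)).filter (fun s => s ≠ "") := by
        rw [hcc]; simp [hx]
      simpa using List.of_mem_filter hm
    have hturns : (s :: r).foldl pvTurnStep [] = s :: pvCol s r := by
      rw [List.foldl_cons, show pvTurnStep [] s = [s] from rfl,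
        pvTurns_eq r [s] (by simp)]
      simp
    unfold speaker_exchange_pairs_py
    rw [hcc, if_neg (by simp)]
    show ((((s :: r).foldl pvTurnStep []).zip (((s :: r).foldl pvTurnStep []).drop 1)).foldl
        (fun pairs lr => if lr.1 ≠ "" ∧ lr.2 ≠ "" ∧ lr.1 ≠ lr.2
          then pairs ++ [lr.1 ++ "->" ++ lr.2] else pairs) []) = pvPairs s r
    rw [hturns,
      PySem.List.foldl_append_ite (p := fun lr : String × String => lr.1 ≠ "" ∧ lr.2 ≠ "" ∧ lr.1 ≠ lr.2)
        (f := fun lr : String × String => lr.1 ++ "->" ++ lr.2)]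
    rw [List.nil_append]
    exact pvPairs_of_col r s hs hmem
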